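-- pv_equiv track=rewrite | github.com/niinasaarelainen/omat-python-projektit2020 | CodeAcademy_recursion2021/matriisin_lapikaynti.py | list_sum_recursive
-- ===== SOURCE A (Python) =====
-- def list_sum_recursive(input_list):
--     # Base case
--     if input_list == []:
--         return 0
--
--     # Recursive case
--     # Decompose the original problem into simpler instances of the same problem
--     # by making use of the fact that the input is a recursive data structure
--     # and can be deï¬ned in terms of a smaller version of itself
--     else:
--         head = input_list[0]
--         if head < 0:
--             head = 0
--         smaller_list = input_list[1:]
--         return head + list_sum_recursive(smaller_list)
-- ===== SOURCE B (Python) =====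
-- def list_sum_recursive(input_list):
--     total = 0
--     for x in reversed(input_list):
--         total = (x if x >= 0 else 0) + total
--     return total
-- ===== Notes on version B (the rewrite author's own statement) =====
-- stated objective: faster
-- what changed: Replaces the recursive head/tail decomposition (which slices the list at every step) with an iterative reverse-order accumulator loop.
import Mathlib
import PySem

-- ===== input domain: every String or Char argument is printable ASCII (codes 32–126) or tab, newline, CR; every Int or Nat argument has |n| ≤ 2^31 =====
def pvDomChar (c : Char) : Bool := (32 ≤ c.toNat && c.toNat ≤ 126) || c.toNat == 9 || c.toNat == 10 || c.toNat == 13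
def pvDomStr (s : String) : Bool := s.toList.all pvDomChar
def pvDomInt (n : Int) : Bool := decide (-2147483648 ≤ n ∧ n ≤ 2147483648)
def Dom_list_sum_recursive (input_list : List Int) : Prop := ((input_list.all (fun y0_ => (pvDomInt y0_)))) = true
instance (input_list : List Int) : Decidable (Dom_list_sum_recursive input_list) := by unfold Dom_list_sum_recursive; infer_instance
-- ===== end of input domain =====

-- B replaces A's recursion (with per-step list slicing) by an iterative reverse-order accumulator loop; objective: faster (linear vs quadratic slicing).

-- ===== PORT A =====
def list_sum_recursive (input_list : List Int) : Int :=
  match input_list with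
  | [] => 0
  | head :: smaller_list =>
    (if head < 0 then 0 else head) + list_sum_recursive smaller_list

-- ===== PORT B =====
def list_sum_recursive_alt (input_list : List Int) : Int :=
  input_list.reverse.foldl (fun total x => (if x ≥ 0 then x else 0) + total) 0

-- ===== PRECONDITION & SPEC =====
def Spec_list_sum_recursive (input_list : List Int) (out : Int) : Prop := out = list_sum_recursive_alt input_list
instance (input_list : List Int) (out : Int) : Decidable (Spec_list_sum_recursive input_list out) := by unfold Spec_list_sum_recursive; infer_instance

-- ===== CLAIM (what is proved, stated in full; the proofs are below) =====
def Claim_equal_list_sum_recursive : Prop := ∀ (input_list : List Int), Dom_list_sum_recursive input_list → Spec_list_sum_recursive input_list (list_sum_recursive input_list)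

-- ===== LEMMAS AND PROOFS =====
theorem alt_cons (x : Int) (xs : List Int) :
    list_sum_recursive_alt (x :: xs) = (if x ≥ 0 then x else 0) + list_sum_recursive_alt xs := by
  simp [list_sum_recursive_alt, List.foldl_append]

theorem ab_eq (xs : List Int) : list_sum_recursive xs = list_sum_recursive_alt xs := by
  induction xs with
  | nil => rfl
  | cons x xs ih =>
    rw [alt_cons, list_sum_recursive, ih]
    by_cases h : x < 0 <;> simp [h] <;> omega

-- ===== VERDICT (by name: the statement is the Claim_ definition above) =====
theorem list_sum_recursive_spec : Claim_equal_list_sum_recursive := by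
  intro input_list _
  exact ab_eq input_list
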